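-- pv_equiv track=rewrite | github.com/yerincho04/SWAI | db_chatbot/data_access.py | _pick_extra_by_year
-- ===== SOURCE A (Python) =====
-- from typing import Any
--
-- def _pick_extra_by_year(
--
--     year_map: dict[int, dict[int, dict[str, Any]]],
--     brand_id: int,
--     preferred_year: int | None,
-- ) -> tuple[dict[str, Any] | None, int | None]:
--     rows = year_map.get(brand_id, {})
--     if not rows:
--         return None, None
--     years = sorted(rows.keys())
--     if preferred_year is None:
--         y = years[-1]
--         return rows[y], y
--     if preferred_year in rows:
--         return rows[preferred_year], preferred_year
--     prior = [y for y in years if y <= preferred_year]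
--     if prior:
--         y = prior[-1]
--         return rows[y], y
--     y = years[0]
--     return rows[y], y
-- ===== SOURCE B (Python) =====
-- def _pick_extra_by_year(year_map, brand_id, preferred_year):
--     rows = year_map.get(brand_id, {})
--     if not rows:
--         return None, None
--     if preferred_year is None:
--         y = max(rows)
--     else:
--         y = max(rows, key=lambda k: (1, k) if k <= preferred_year else (0, -k))
--     return rows[y], y
-- ===== Notes on version B (the rewrite author's own statement) =====
-- stated objective: simpler
-- what changed: Replaced sort + membership test + filtered 'prior' list + four return branches with early returns and a single keyed max pass whose composite key prefers in-range years (largest) and otherwise the smallest year.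
import Mathlib
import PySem

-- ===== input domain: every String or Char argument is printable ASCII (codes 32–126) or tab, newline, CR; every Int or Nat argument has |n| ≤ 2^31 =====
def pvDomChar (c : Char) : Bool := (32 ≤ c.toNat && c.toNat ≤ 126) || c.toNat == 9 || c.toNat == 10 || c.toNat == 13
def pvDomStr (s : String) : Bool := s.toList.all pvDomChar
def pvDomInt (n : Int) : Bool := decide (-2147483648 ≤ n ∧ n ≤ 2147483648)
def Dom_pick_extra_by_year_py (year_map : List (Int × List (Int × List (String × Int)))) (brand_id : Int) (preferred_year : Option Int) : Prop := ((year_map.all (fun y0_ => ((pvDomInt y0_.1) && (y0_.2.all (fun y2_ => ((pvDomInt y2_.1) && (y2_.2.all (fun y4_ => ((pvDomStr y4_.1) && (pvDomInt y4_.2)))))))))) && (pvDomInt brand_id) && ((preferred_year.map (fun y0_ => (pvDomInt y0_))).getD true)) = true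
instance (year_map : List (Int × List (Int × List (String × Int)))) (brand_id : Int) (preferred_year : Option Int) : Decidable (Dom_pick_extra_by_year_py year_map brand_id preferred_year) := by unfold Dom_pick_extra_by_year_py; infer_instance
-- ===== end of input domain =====

-- B: one keyed max pass replaces sort + membership test + filtered "prior" list (alternative decomposition; return value only).
-- ===== PORT A =====
def pick_extra_by_year_py (year_map : List (Int × List (Int × List (String × Int)))) (brand_id : Int) (preferred_year : Option Int) : (Option (List (String × Int))) × Option Int :=
  let rows : PySem.Dict Int (List (String × Int)) :=
    PySem.Dict.mk ((PySem.Dict.mk year_map).getD brand_id [])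
  if rows.items = [] then (none, none)
  else
    let years := PySem.List.sorted rows.keys (fun y => y) false
    match preferred_year with
    | none =>
        let y := PySem.List.pyGetD years (-1) 0
        (rows.get? y, some y)
    | some pref =>
        if rows.contains pref then (rows.get? pref, some pref)
        else
          let prior := years.filter (fun y => decide (y ≤ pref))
          if prior ≠ [] then
            let y := PySem.List.pyGetD prior (-1) 0
            (rows.get? y, some y)
          else
            let y := PySem.List.pyGetD years 0 0
            (rows.get? y, some y)

-- ===== PORT B =====
def pick_extra_by_year_py_alt (year_map : List (Int × List (Int × List (String × Int)))) (brand_id : Int) (preferred_year : Option Int) : (Option (List (String × Int))) × Option Int :=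
  let rows : PySem.Dict Int (List (String × Int)) :=
    PySem.Dict.mk ((PySem.Dict.mk year_map).getD brand_id [])
  if rows.items = [] then (none, none)
  else
    let y : Int :=
      match preferred_year with
      | none => (PySem.List.max? rows.keys (fun k => k)).getD 0
      | some pref =>
          (PySem.List.max2? rows.keys
            (fun k => if k ≤ pref then (1 : Int) else 0)
            (fun k => if k ≤ pref then k else -k)).getD 0
    (rows.get? y, some y)

-- ===== PRECONDITION & SPEC =====
def Spec_pick_extra_by_year_py (year_map : List (Int × List (Int × List (String × Int)))) (brand_id : Int) (preferred_year : Option Int) (out : (Option (List (String × Int))) × Option Int) : Prop := out = pick_extra_by_year_py_alt year_map brand_id preferred_year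
instance (year_map : List (Int × List (Int × List (String × Int)))) (brand_id : Int) (preferred_year : Option Int) (out : (Option (List (String × Int))) × Option Int) : Decidable (Spec_pick_extra_by_year_py year_map brand_id preferred_year out) := by unfold Spec_pick_extra_by_year_py; infer_instance

-- ===== CLAIM (what is proved, stated in full; the proofs are below) =====
def Claim_equal_pick_extra_by_year_py : Prop := ∀ (year_map : List (Int × List (Int × List (String × Int)))) (brand_id : Int) (preferred_year : Option Int), Dom_pick_extra_by_year_py year_map brand_id preferred_year → Spec_pick_extra_by_year_py year_map brand_id preferred_year (pick_extra_by_year_py year_map brand_id preferred_year)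

-- ===== LEMMAS AND PROOFS =====

def pvStep (k1 k2 : Int → Int) (acc : Option Int) (x : Int) : Option Int :=
  match acc with
  | none => some x
  | some c =>
    if (decide (k1 c < k1 x) || !decide (k1 x < k1 c) && decide (k2 c < k2 x)) = true
    then some x else some c

theorem pv_max2_eq (k1 k2 : Int → Int) (ks : List Int) :
    PySem.List.max2? ks k1 k2 = List.foldl (pvStep k1 k2) none ks := by
  simp only [PySem.List.max2?]
  generalize (none : Option Int) = acc
  induction ks generalizing acc with
  | nil => rfl
  | cons y t ih =>
    rw [List.foldl_cons, List.foldl_cons, ih]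
    congr 1
    cases acc <;> rfl

def pvLexLT (k1 k2 : Int → Int) (z m : Int) : Prop :=
  k1 z < k1 m ∨ (k1 z = k1 m ∧ k2 z < k2 m)

theorem pv_pairwise_le_getLast {l : List Int} (hp : l.Pairwise (· ≤ ·)) (h : l ≠ []) :
    ∀ x ∈ l, x ≤ l.getLast h := by
  induction l with
  | nil => simp at h
  | cons a t ih =>
    rcases List.pairwise_cons.mp hp with ⟨ha, hpt⟩
    intro x hx
    rcases List.mem_cons.mp hx with rfl | hxt
    · cases t with
      | nil => simp
      | cons b u =>
        rw [List.getLast_cons (by simp)]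
        exact le_trans (ha b (by simp)) (ih hpt (by simp) b (by simp))
    · cases t with
      | nil => simp at hxt
      | cons b u =>
        rw [List.getLast_cons (by simp)]
        exact ih hpt (by simp) x hxt

theorem pv_max2_foldl (k1 k2 : Int → Int) (m : Int) :
    ∀ (ks : List Int) (a : Int),
      (∀ z ∈ ks, z ≠ m → pvLexLT k1 k2 z m) →
      (a = m ∨ (pvLexLT k1 k2 a m ∧ m ∈ ks)) →
      List.foldl (pvStep k1 k2) (some a) ks = some m := by
  intro ks
  induction ks with
  | nil =>
    intro a _ ha
    rcases ha with rfl | ⟨_, hm⟩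
    · rfl
    · simp at hm
  | cons y t ih =>
    intro a hlt ha
    have hstep :
        pvStep k1 k2 (some a) y
        = some (if (decide (k1 a < k1 y) || !decide (k1 y < k1 a) && decide (k2 a < k2 y)) = true then y else a) := by
      by_cases h : (decide (k1 a < k1 y) || !decide (k1 y < k1 a) && decide (k2 a < k2 y)) = true <;> simp [pvStep, h]
    rw [List.foldl_cons, hstep]
    set a' := if (decide (k1 a < k1 y) || !decide (k1 y < k1 a) && decide (k2 a < k2 y)) = true then y else a with ha'
    apply ih
    · exact fun z hz hzm => hlt z (List.mem_cons_of_mem _ hz) hzm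
    · -- establish invariant for a'
      by_cases hym : y = m
      · -- current element is m: it wins or a was already m
        subst hym
        rcases ha with rfl | ⟨hlta, _⟩
        · -- a = m: condition must be false (LexLT y y impossible)
          left
          rw [ha']
          split
          · rfl
          · rfl
        · -- a strictly below m: m wins
          left
          rw [ha']
          rcases hlta with h1 | ⟨h1, h2⟩
          · simp [h1]
          · simp [h1, h2]
      · -- y ≠ m: y is strictly below m; whatever a' is, invariant keeps
        have hy : pvLexLT k1 k2 y m := hlt y (by simp) hym
        rcases ha with rfl | ⟨hlta, hm⟩
        · -- a = m: y cannot beat m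
          left
          rw [ha']
          have hcond : (decide (k1 a < k1 y) || !decide (k1 y < k1 a) && decide (k2 a < k2 y)) = false := by
            rcases hy with h1 | ⟨h1, h2⟩
            · simp [not_lt.mpr (le_of_lt h1), h1]
            · simp [h1, not_lt.mpr (le_of_lt h2)]
          simp [hcond]
        · -- a < m, y < m : a' ∈ {a, y} both LexLT m; m ∈ t since m ∈ y::t and y ≠ m
          right
          constructor
          · rw [ha']; split
            · exact hy
            · exact hlta
          · rcases List.mem_cons.mp hm with rfl | hmt
            · exact absurd rfl hym
            · exact hmt

theorem pv_max2_getD (k1 k2 : Int → Int) (ks : List Int) (m : Int)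
    (hne : ks ≠ []) (hm : m ∈ ks)
    (hmax : ∀ z ∈ ks, z ≠ m → pvLexLT k1 k2 z m) :
    (PySem.List.max2? ks k1 k2).getD 0 = m := by
  cases ks with
  | nil => simp at hne
  | cons x t =>
    have : PySem.List.max2? (x :: t) k1 k2 = some m := by
      rw [pv_max2_eq, List.foldl_cons]
      refine Eq.trans (b := List.foldl (pvStep k1 k2) (some x) t) rfl ?_
      refine pv_max2_foldl k1 k2 m t x ?_ ?_
      · exact fun z hz hzm => hmax z (List.mem_cons_of_mem _ hz) hzm
      · by_cases hxm : x = m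
        · exact Or.inl hxm
        · refine Or.inr ⟨hmax x (by simp) hxm, ?_⟩
          rcases List.mem_cons.mp hm with rfl | hmt
          · exact absurd rfl hxm
          · exact hmt
    rw [this]
    rfl

theorem pv_max?_getD (ks : List Int) (m : Int) (hne : ks ≠ []) (hm : m ∈ ks)
    (hmax : ∀ z ∈ ks, z ≤ m) :
    (PySem.List.max? ks (fun k => k)).getD 0 = m := by
  rcases ho : PySem.List.max? ks (fun k => k) with _ | m'
  · exact absurd ((PySem.List.max?_eq_none_iff ks _).mp ho) hne
  · have h1 : m' ∈ ks := PySem.List.max?_mem ho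
    have h2 := PySem.List.max?_isMax ho m hm
    simp only [Option.getD_some]
    exact le_antisymm (hmax m' h1) h2

theorem pv_core (rows : PySem.Dict Int (List (String × Int))) (p : Option Int) :
    (if rows.items = [] then ((none, none) : (Option (List (String × Int))) × Option Int)
     else
       let years := PySem.List.sorted rows.keys (fun y => y) false
       match p with
       | none =>
           let y := PySem.List.pyGetD years (-1) 0
           (rows.get? y, some y)
       | some pref =>
           if rows.contains pref then (rows.get? pref, some pref)
           else
             let prior := years.filter (fun y => decide (y ≤ pref))
             if prior ≠ [] then
               let y := PySem.List.pyGetD prior (-1) 0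
               (rows.get? y, some y)
             else
               let y := PySem.List.pyGetD years 0 0
               (rows.get? y, some y))
    =
    (if rows.items = [] then ((none, none) : (Option (List (String × Int))) × Option Int)
     else
       let y : Int :=
         (match p with
         | none => (PySem.List.max? rows.keys (fun k => k)).getD 0
         | some pref =>
             (PySem.List.max2? rows.keys
               (fun k => if k ≤ pref then (1 : Int) else 0)
               (fun k => if k ≤ pref then k else -k)).getD 0)
       (rows.get? y, some y)) := by
  by_cases hemp : rows.items = []
  · simp [hemp]
  · simp only [if_neg hemp]
    have hks : rows.keys ≠ [] := by
      simp only [PySem.Dict.keys]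
      simpa using hemp
    set ks := rows.keys with hksdef
    set years := PySem.List.sorted ks (fun y => y) false with hyrs
    have hyne : years ≠ [] := by
      rw [hyrs]; exact fun h => hks ((PySem.List.sorted_eq_nil_iff _ _ _).mp h)
    have hperm : ∀ z, z ∈ years ↔ z ∈ ks := fun z => PySem.List.mem_sorted ks _ false z
    have hpair : years.Pairwise (· ≤ ·) := PySem.List.sorted_pairwise ks (fun y => y)
    match p with
    | none =>
        simp only []
        have hy := PySem.List.pyGetD_neg_one years 0 hyne
        set m := years.getLast hyne with hm
        have hmem : m ∈ ks := (hperm m).mp (List.getLast_mem hyne)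
        have hmax : ∀ z ∈ ks, z ≤ m :=
          fun z hz => pv_pairwise_le_getLast hpair hyne z ((hperm z).mpr hz)
        simp only [hy]
        rw [pv_max?_getD ks m hks hmem hmax]
    | some pref =>
        simp only []
        set k1 : Int → Int := fun k => if k ≤ pref then (1 : Int) else 0 with hk1
        set k2 : Int → Int := fun k => if k ≤ pref then k else -k with hk2
        by_cases hc : rows.contains pref
        · have hpm : pref ∈ ks := (PySem.Dict.contains_iff_mem_keys rows pref).mp hc
          have hdom : ∀ z ∈ ks, z ≠ pref → pvLexLT k1 k2 z pref := by
            intro z hz hzp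
            by_cases hzle : z ≤ pref
            · right
              constructor
              · simp [hk1, hzle]
              · simp only [hk2, if_pos hzle, if_pos (le_refl pref)]
                omega
            · left
              simp [hk1, hzle]
          rw [if_pos hc, pv_max2_getD k1 k2 ks pref hks hpm hdom]
        · rw [if_neg hc]
          set prior := years.filter (fun y => decide (y ≤ pref)) with hpr
          by_cases hprne : prior ≠ []
          · rw [if_pos hprne]
            have hprpair : prior.Pairwise (· ≤ ·) := List.Pairwise.filter _ hpair
            set m := prior.getLast hprne with hm
            have hmpr : m ∈ prior := List.getLast_mem hprne
            have hmy : m ∈ years ∧ m ≤ pref := by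
              have := List.mem_filter.mp (hpr ▸ hmpr)
              exact ⟨this.1, by simpa using this.2⟩
            have hmem : m ∈ ks := (hperm m).mp hmy.1
            have hdom : ∀ z ∈ ks, z ≠ m → pvLexLT k1 k2 z m := by
              intro z hz hzm
              by_cases hzle : z ≤ pref
              · have hzpr : z ∈ prior := by
                  rw [hpr]
                  exact List.mem_filter.mpr ⟨(hperm z).mpr hz, by simpa using hzle⟩
                have hzm' : z ≤ m := pv_pairwise_le_getLast hprpair hprne z hzpr
                right
                constructor
                · simp [hk1, hzle, hmy.2]
                · simp only [hk2, if_pos hzle, if_pos hmy.2]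
                  omega
              · left
                simp [hk1, hzle, hmy.2]
            rw [PySem.List.pyGetD_neg_one prior 0 hprne,
                pv_max2_getD k1 k2 ks m hks hmem hdom]
          · rw [if_neg hprne]
            rw [not_not] at hprne
            have hall : ∀ z ∈ years, ¬ z ≤ pref := by
              intro z hz hzle
              have : z ∈ prior := by
                rw [hpr]; exact List.mem_filter.mpr ⟨hz, by simpa using hzle⟩
              rw [hprne] at this
              simp at this
            rcases hy : years with _ | ⟨m, t⟩
            · exact absurd hy hyne
            · have hhead : ∀ z ∈ ks, m ≤ z := by
                have := PySem.List.key_head_sorted_le ks (fun y => y) (hyrs ▸ hy)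
                simpa using this
              have hmem : m ∈ ks := (hperm m).mp (hy ▸ List.mem_cons_self)
              have hmnle : ¬ m ≤ pref := hall m (hy ▸ List.mem_cons_self)
              have hdom : ∀ z ∈ ks, z ≠ m → pvLexLT k1 k2 z m := by
                intro z hz hzm
                have hznle : ¬ z ≤ pref := hall z ((hperm z).mpr hz)
                right
                constructor
                · simp [hk1, hznle, hmnle]
                · simp only [hk2, if_neg hznle, if_neg hmnle]
                  have := hhead z hz
                  omega
              have : PySem.List.pyGetD (m :: t) 0 0 = m := by
                rw [PySem.List.pyGetD_zero]; rfl
              rw [this, pv_max2_getD k1 k2 ks m hks hmem hdom]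



-- ===== VERDICT (by name: the statement is the Claim_ definition above) =====
theorem pick_extra_by_year_py_spec : Claim_equal_pick_extra_by_year_py := by
  intro ym b p _
  unfold Spec_pick_extra_by_year_py
  exact pv_core (PySem.Dict.mk ((PySem.Dict.mk ym).getD b [])) p
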